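-- pv_equiv track=rewrite | github.com/VendorSentry/clairedev-platform | multi_ai_manager.py | _extract_files_from_collaborative_result
-- ===== SOURCE A (Python) =====
-- from typing import Dict, List, Optional, Any
--
-- def _extract_files_from_collaborative_result(result: Dict[str, Any]) -> Dict[str, str]:
--     """Extract individual files from collaborative AI result"""
--     # This would parse the collaborative code and split it into files
--     # Implementation depends on how the AIs structure their responses
--
--     files = {}
--     code_content = result.get("code", "")
--
--     # Simple file extraction logic (can be enhanced)
--     current_file = None
--     current_content = []
--
--     for line in code_content.split('\n'):
--         if line.startswith('// FILE:') or line.startswith('# FILE:'):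
--             if current_file:
--                 files[current_file] = '\n'.join(current_content)
--             current_file = line.split(':', 1)[1].strip()
--             current_content = []
--         elif current_file:
--             current_content.append(line)
--
--     if current_file:
--         files[current_file] = '\n'.join(current_content)
--
--     return files if files else {"main.py": code_content}
-- ===== SOURCE B (Python) =====
-- def _extract_files_from_collaborative_result(result):
--     """Extract individual files from collaborative AI result"""
--     code_content = result.get("code", "")
--     lines = code_content.split('\n')
--     # phase 1: locate every marker line once, with its index and stripped filename
--     markers = [(i, line.split(':', 1)[1].strip())
--                for i, line in enumerate(lines)
--                if line.startswith('// FILE:') or line.startswith('# FILE:')]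
--     # phase 2: each file body is the slice between its marker and the next marker
--     ends = [i for i, _ in markers[1:]] + [len(lines)]
--     files = {}
--     for (i, name), end in zip(markers, ends):
--         if name:
--             files[name] = '\n'.join(lines[i + 1:end])
--     return files if files else {"main.py": code_content}
-- ===== Notes on version B (the rewrite author's own statement) =====
-- stated objective: alternative
-- what changed: B replaces A's single-pass accumulator state machine (current_file/current_content carried through every line) with a two-phase plan: first collect all marker positions and filenames by enumerating the lines, then assign each file the slice of lines between consecutive markers.
import Mathlib
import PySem

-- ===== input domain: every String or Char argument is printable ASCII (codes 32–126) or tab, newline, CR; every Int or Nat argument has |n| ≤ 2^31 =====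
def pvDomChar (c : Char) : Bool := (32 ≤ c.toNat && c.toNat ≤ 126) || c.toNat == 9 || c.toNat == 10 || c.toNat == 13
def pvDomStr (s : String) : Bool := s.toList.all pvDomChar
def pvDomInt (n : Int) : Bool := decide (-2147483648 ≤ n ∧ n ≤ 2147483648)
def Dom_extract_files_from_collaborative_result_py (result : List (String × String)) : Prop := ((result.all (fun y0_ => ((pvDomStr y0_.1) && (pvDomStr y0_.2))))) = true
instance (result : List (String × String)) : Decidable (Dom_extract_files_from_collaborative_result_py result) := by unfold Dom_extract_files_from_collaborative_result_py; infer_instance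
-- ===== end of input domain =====

-- B replaces A's single-pass accumulator state machine by a two-phase plan (collect all
-- marker positions, then slice the lines between consecutive markers); same cost, clearer shape.

-- ===== PORT A =====
-- result.get("code", "") : first-match lookup in the association list
def pvGetCode (result : List (String × String)) : String :=
  (((result.find? (fun p => p.1 == "code")).map (fun p => p.2)).getD "")

-- line.startswith('// FILE:') or line.startswith('# FILE:')
def pvIsMarker (line : String) : Bool :=
  PySem.Str.startswith line "// FILE:" || PySem.Str.startswith line "# FILE:"

-- line.split(':', 1)[1].strip()  (both .getD defaults are unreachable: ":" ≠ "" and every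
-- marker line contains a ':', so the split has a piece at index 1)
def pvFileName (line : String) : String :=
  PySem.Str.strip (((PySem.Str.splitMax? line ":" 1).getD []).getD 1 "")

-- the 'if current_file: files[current_file] = "\n".join(current_content)' block
-- ('' and None are both falsy, so neither inserts)
def pvFinishA (st : PySem.Dict String String × Option String × List String) :
    PySem.Dict String String :=
  match st.2.1 with
  | some c => if c = "" then st.1 else st.1.insert c (PySem.Str.join "\n" st.2.2)
  | none => st.1

-- one iteration of A's for-loop over (files, current_file, current_content)
def pvStepA (st : PySem.Dict String String × Option String × List String) (line : String) :
    PySem.Dict String String × Option String × List String :=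
  if pvIsMarker line then
    (pvFinishA st, some (pvFileName line), [])
  else
    match st.2.1 with
    | some c => if c = "" then st else (st.1, st.2.1, st.2.2 ++ [line])
    | none => st

def extract_files_from_collaborative_result_py (result : List (String × String)) :
    List (String × String) :=
  let code := pvGetCode result
  let lines := (PySem.Str.split? code "\n").getD []   -- sep "\n" ≠ "", never none
  let files := pvFinishA (lines.foldl pvStepA (PySem.Dict.empty, none, []))
  if files.items.isEmpty then [("main.py", code)] else files.items

-- ===== PORT B =====
def extract_files_from_collaborative_result_py_alt (result : List (String × String)) :
    List (String × String) :=
  let code := pvGetCode result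
  let lines := (PySem.Str.split? code "\n").getD []   -- sep "\n" ≠ "", never none
  let markers := (PySem.List.enumerate lines 0).filterMap
      (fun q => if pvIsMarker q.2 then some (q.1, pvFileName q.2) else none)
  let ends := (PySem.List.slice markers (some 1) none).map (fun m => m.1)
      ++ [(lines.length : Int)]
  let files := (markers.zip ends).foldl
      (fun files q =>
        if q.1.2 = "" then files
        else files.insert q.1.2
          (PySem.Str.join "\n" (PySem.List.slice lines (some (q.1.1 + 1)) (some q.2))))
      PySem.Dict.empty
  if files.items.isEmpty then [("main.py", code)] else files.items

-- ===== PRECONDITION & SPEC =====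
def Spec_extract_files_from_collaborative_result_py (result : List (String × String)) (out : List (String × String)) : Prop := out = extract_files_from_collaborative_result_py_alt result
instance (result : List (String × String)) (out : List (String × String)) : Decidable (Spec_extract_files_from_collaborative_result_py result out) := by unfold Spec_extract_files_from_collaborative_result_py; infer_instance

-- ===== CLAIM (what is proved, stated in full; the proofs are below) =====
def Claim_equal_extract_files_from_collaborative_result_py : Prop := ∀ (result : List (String × String)), Dom_extract_files_from_collaborative_result_py result → Spec_extract_files_from_collaborative_result_py result (extract_files_from_collaborative_result_py result)

-- ===== LEMMAS AND PROOFS =====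

-- non-marker predicate, for takeWhile/dropWhile
def pvNM (l : String) : Bool := !pvIsMarker l

-- canonical reference: process the lines marker-segment by marker-segment
def pvRef : PySem.Dict String String → List String → PySem.Dict String String
  | f, [] => f
  | f, l :: ls =>
    if pvIsMarker l then
      pvRef (if pvFileName l = "" then f
             else f.insert (pvFileName l) (PySem.Str.join "\n" (ls.takeWhile pvNM)))
        (ls.dropWhile pvNM)
    else pvRef f ls
  termination_by _ ls => ls.length
  decreasing_by
  · have := List.length_dropWhile_le pvNM ls; simp; omega
  · simp

-- marker positions and names, starting at index p
def pvMks : Nat → List String → List (Int × String)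
  | _, [] => []
  | p, l :: ls =>
    if pvIsMarker l then ((p : Int), pvFileName l) :: pvMks (p + 1) ls
    else pvMks (p + 1) ls

-- the end bound B's loop reads from the next marker
def pvEnd (lines : List String) (rest : List (Int × String)) : Int :=
  match rest with
  | [] => (lines.length : Int)
  | (j, _) :: _ => j

-- structural form of B's assignment loop
def pvAsg (lines : List String) : PySem.Dict String String → List (Int × String) → PySem.Dict String String
  | f, [] => f
  | f, (i, n) :: rest =>
    pvAsg lines
      (if n = "" then f
       else f.insert n (PySem.Str.join "\n"
         (PySem.List.slice lines (some (i + 1)) (some (pvEnd lines rest)))))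
      rest

lemma pvRef_dropWhile : ∀ (ls : List String) (f : PySem.Dict String String),
    pvRef f ls = pvRef f (ls.dropWhile pvNM) := by
  intro ls
  induction ls with
  | nil => intro f; rfl
  | cons l ls ih =>
    intro f
    by_cases h : pvIsMarker l
    · have : pvNM l = false := by simp [pvNM, h]
      rw [List.dropWhile_cons_of_neg (by simp [this])]
    · have : pvNM l = true := by simp [pvNM, h]
      rw [List.dropWhile_cons_of_pos this]
      rw [pvRef, if_neg h]
      exact ih f

lemma pvA_main : ∀ (n : Nat) (ls : List String), ls.length ≤ n → ∀ f : PySem.Dict String String,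
    (pvFinishA (ls.foldl pvStepA (f, none, [])) = pvRef f ls)
    ∧ (∀ acc, pvFinishA (ls.foldl pvStepA (f, some "", acc)) = pvRef f ls)
    ∧ (∀ c acc, c ≠ "" → pvFinishA (ls.foldl pvStepA (f, some c, acc)) =
        pvRef (f.insert c (PySem.Str.join "\n" (acc ++ ls.takeWhile pvNM))) (ls.dropWhile pvNM)) := by
  intro n
  induction n with
  | zero =>
    intro ls h f
    have : ls = [] := List.eq_nil_of_length_eq_zero (Nat.le_zero.mp h)
    subst this
    refine ⟨by simp [pvFinishA, pvRef], fun acc => by simp [pvFinishA, pvRef],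
      fun c acc hc => by simp [pvFinishA, pvRef, hc]⟩
  | succ n ih =>
    intro ls h f
    cases ls with
    | nil =>
      refine ⟨by simp [pvFinishA, pvRef], fun acc => by simp [pvFinishA, pvRef],
        fun c acc hc => by simp [pvFinishA, pvRef, hc]⟩
    | cons l ls =>
      have h' : ls.length ≤ n := by simp at h; omega
      by_cases hm : pvIsMarker l
      · -- marker line: every state inserts the pending file (if truthy) and restarts
        have hstep : ∀ st : PySem.Dict String String × Option String × List String,
            pvStepA st l = (pvFinishA st, some (pvFileName l), []) := by
          intro st; simp [pvStepA, hm]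
        have hnm : pvNM l = false := by simp [pvNM, hm]
        have key : ∀ g : PySem.Dict String String,
            pvFinishA (List.foldl pvStepA (g, some (pvFileName l), []) ls) =
              pvRef g (l :: ls) := by
          intro g
          conv_rhs => rw [pvRef]
          rw [if_pos hm]
          by_cases hn : pvFileName l = ""
          · rw [if_pos hn, ← pvRef_dropWhile, hn]
            exact (ih ls h' g).2.1 []
          · rw [if_neg hn]
            simpa using (ih ls h' g).2.2 (pvFileName l) [] hn
        refine ⟨?_, ?_, ?_⟩
        · rw [List.foldl_cons, hstep]
          have hf : pvFinishA (f, none, []) = f := rfl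
          rw [hf]; exact key f
        · intro acc
          rw [List.foldl_cons, hstep]
          have hf : pvFinishA (f, some "", acc) = f := by simp [pvFinishA]
          rw [hf]; exact key f
        · intro c acc hc
          rw [List.foldl_cons, hstep]
          have hf : pvFinishA (f, some c, acc) = f.insert c (PySem.Str.join "\n" acc) := by
            simp [pvFinishA, hc]
          rw [hf, List.takeWhile_cons_of_neg (by simp [hnm]),
            List.dropWhile_cons_of_neg (by simp [hnm]), List.append_nil]
          exact key (f.insert c (PySem.Str.join "\n" acc))
      · -- ordinary line: appended to the current content (or ignored)
        have hnm : pvNM l = true := by simp [pvNM, hm]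
        refine ⟨?_, ?_, ?_⟩
        · rw [List.foldl_cons]
          have hst : pvStepA (f, none, []) l = (f, none, []) := by simp [pvStepA, hm]
          rw [hst]
          conv_rhs => rw [pvRef]
          rw [if_neg hm]
          exact (ih ls h' f).1
        · intro acc
          rw [List.foldl_cons]
          have hst : pvStepA (f, some "", acc) l = (f, some "", acc) := by simp [pvStepA, hm]
          rw [hst]
          conv_rhs => rw [pvRef]
          rw [if_neg hm]
          exact (ih ls h' f).2.1 acc
        · intro c acc hc
          rw [List.foldl_cons]
          have hst : pvStepA (f, some c, acc) l = (f, some c, acc ++ [l]) := by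
            simp [pvStepA, hm, hc]
          rw [hst, List.takeWhile_cons_of_pos hnm, List.dropWhile_cons_of_pos hnm,
            (ih ls h' f).2.2 c (acc ++ [l]) hc]
          congr 2
          simp

lemma pvB_enum : ∀ (ls : List String) (p : Nat),
    (PySem.List.enumerate ls (p : Int)).filterMap
      (fun q => if pvIsMarker q.2 then some (q.1, pvFileName q.2) else none) = pvMks p ls := by
  intro ls
  induction ls with
  | nil => intro p; rfl
  | cons l ls ih =>
    intro p
    rw [PySem.List.enumerate_cons, List.filterMap_cons]
    have hc : ((p : Int) + 1) = ((p + 1 : Nat) : Int) := by push_cast; ring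
    by_cases h : pvIsMarker l
    · simp only [h, if_pos, pvMks, hc, ih (p + 1)]
    · simp only [h, Bool.false_eq_true, if_false, pvMks, hc, ih (p + 1)]

lemma pvB_zip : ∀ (lines : List String) (ms : List (Int × String)) (f : PySem.Dict String String),
    (ms.zip (ms.tail.map (fun m => m.1) ++ [(lines.length : Int)])).foldl
      (fun files q =>
        if q.1.2 = "" then files
        else files.insert q.1.2
          (PySem.Str.join "\n" (PySem.List.slice lines (some (q.1.1 + 1)) (some q.2)))) f
    = pvAsg lines f ms := by
  intro lines ms
  induction ms with
  | nil => intro f; rfl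
  | cons m rest ih =>
    intro f
    obtain ⟨i, n⟩ := m
    cases rest with
    | nil => simp [pvAsg, pvEnd]
    | cons r rs =>
      rw [List.tail_cons, List.map_cons, List.cons_append, List.zip_cons_cons, List.foldl_cons]
      rw [pvAsg]
      have : pvEnd lines (r :: rs) = r.1 := rfl
      rw [this]
      exact ih _

lemma pvMks_dropWhile : ∀ (ls : List String) (p : Nat),
    pvMks p ls = pvMks (p + (ls.takeWhile pvNM).length) (ls.dropWhile pvNM) := by
  intro ls
  induction ls with
  | nil => intro p; rfl
  | cons l ls ih =>
    intro p
    by_cases h : pvIsMarker l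
    · have hn : pvNM l = false := by simp [pvNM, h]
      rw [List.takeWhile_cons_of_neg (by simp [hn]), List.dropWhile_cons_of_neg (by simp [hn])]
      simp
    · have hn : pvNM l = true := by simp [pvNM, h]
      rw [List.takeWhile_cons_of_pos hn, List.dropWhile_cons_of_pos hn]
      rw [pvMks, if_neg h, ih (p + 1)]
      congr 1
      simp; omega

lemma pvDropWhile_head_false : ∀ (ls : List String) (m : String) (tail : List String),
    ls.dropWhile pvNM = m :: tail → pvNM m = false := by
  intro ls
  induction ls with
  | nil => intro m tail h; simp at h
  | cons l ls ih =>
    intro m tail h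
    by_cases hl : pvNM l
    · rw [List.dropWhile_cons_of_pos hl] at h; exact ih m tail h
    · rw [List.dropWhile_cons_of_neg (by simp [hl])] at h
      cases h; simpa using hl

lemma pvDropLenTakeWhile (q : String → Bool) : ∀ l : List String,
    l.drop (l.takeWhile q).length = l.dropWhile q := by
  intro l
  induction l with
  | nil => rfl
  | cons a l ih =>
    by_cases h : q a
    · rw [List.takeWhile_cons_of_pos h, List.dropWhile_cons_of_pos h, List.length_cons,
        List.drop_succ_cons, ih]
    · rw [List.takeWhile_cons_of_neg (by simp [h]), List.dropWhile_cons_of_neg (by simp [h])]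
      rfl

lemma pvTakeLenTakeWhile (q : String → Bool) : ∀ l : List String,
    l.take (l.takeWhile q).length = l.takeWhile q := by
  intro l
  induction l with
  | nil => rfl
  | cons a l ih =>
    by_cases h : q a
    · rw [List.takeWhile_cons_of_pos h, List.length_cons, List.take_succ_cons, ih]
    · rw [List.takeWhile_cons_of_neg (by simp [h])]
      rfl

lemma pvCrux : ∀ (n : Nat) (lines ls : List String), ls.length ≤ n → ∀ (p : Nat) (f : PySem.Dict String String),
    lines.drop p = ls → pvAsg lines f (pvMks p ls) = pvRef f ls := by
  intro n
  induction n with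
  | zero =>
    intro lines ls h p f hd
    have : ls = [] := List.eq_nil_of_length_eq_zero (Nat.le_zero.mp h)
    subst this
    rw [show pvMks p ([] : List String) = [] from rfl]
    simp only [pvAsg]
    simp [pvRef]
  | succ n ih =>
    intro lines ls h p f hd
    cases ls with
    | nil =>
      rw [show pvMks p ([] : List String) = [] from rfl]
      simp only [pvAsg]
      simp [pvRef]
    | cons l ls =>
      have h' : ls.length ≤ n := by simp at h; omega
      have hd1 : lines.drop (p + 1) = ls := by
        rw [← List.drop_drop, hd]
        rfl
      by_cases hm : pvIsMarker l
      · have htw : ls.takeWhile pvNM ++ ls.dropWhile pvNM = ls := List.takeWhile_append_dropWhile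
        have hcast : ((p : Int) + 1) = ((p + 1 : Nat) : Int) := by push_cast; ring
        have hmk1 : pvMks p (l :: ls) = ((p : Int), pvFileName l) :: pvMks (p + 1) ls := by
          rw [pvMks, if_pos hm]
        rw [hmk1, pvMks_dropWhile ls (p + 1)]
        conv_rhs => rw [pvRef]
        rw [if_pos hm]
        cases hdw : ls.dropWhile pvNM with
        | nil =>
          have htw2 : ls.takeWhile pvNM = ls := by rw [hdw] at htw; simpa using htw
          simp only [pvMks, pvAsg, pvEnd]
          have hsl : PySem.List.slice lines (some ((p : Int) + 1))
              (some (lines.length : Int)) = ls := by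
            rw [hcast, PySem.List.slice_natCast, hd1]
            apply List.take_of_length_le
            rw [← hd1, List.length_drop]
          rw [hsl, htw2]
          simp [pvRef]
        | cons m tail =>
          have hmm : pvIsMarker m := by
            have := pvDropWhile_head_false ls m tail hdw
            simpa [pvNM] using this
          have hdk : lines.drop (p + 1 + (ls.takeWhile pvNM).length) = m :: tail := by
            rw [← List.drop_drop, hd1, pvDropLenTakeWhile, hdw]
          have hlen2 : (m :: tail).length ≤ n := by
            have h1 := List.length_dropWhile_le pvNM ls
            rw [hdw] at h1
            simp at h1 ⊢
            omega
          have hmk2 : pvMks (p + 1 + (ls.takeWhile pvNM).length) (m :: tail) =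
              (((p + 1 + (ls.takeWhile pvNM).length : Nat) : Int), pvFileName m) ::
                pvMks (p + 1 + (ls.takeWhile pvNM).length + 1) tail := by
            rw [pvMks, if_pos hmm]
          simp only [pvAsg]
          have hend : pvEnd lines (pvMks (p + 1 + (ls.takeWhile pvNM).length) (m :: tail)) =
              ((p + 1 + (ls.takeWhile pvNM).length : Nat) : Int) := by
            rw [hmk2]; rfl
          have hsub : p + 1 + (ls.takeWhile pvNM).length - (p + 1) = (ls.takeWhile pvNM).length := by
            omega
          have hsl : PySem.List.slice lines (some ((p : Int) + 1))
              (some ((p + 1 + (ls.takeWhile pvNM).length : Nat) : Int)) = ls.takeWhile pvNM := by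
            rw [hcast, PySem.List.slice_natCast, hd1, hsub, pvTakeLenTakeWhile]
          rw [hend, hsl]
          exact ih lines (m :: tail) hlen2
            (p + 1 + (ls.takeWhile pvNM).length)
            (if pvFileName l = "" then f
             else f.insert (pvFileName l) (PySem.Str.join "\n" (ls.takeWhile pvNM))) hdk
      · have hmk1 : pvMks p (l :: ls) = pvMks (p + 1) ls := by
          rw [pvMks, if_neg hm]
        rw [hmk1]
        conv_rhs => rw [pvRef]
        rw [if_neg hm]
        exact ih lines ls h' (p + 1) f hd1

lemma pvDictB_eq (lines : List String) :
    ((((PySem.List.enumerate lines 0).filterMap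
        (fun q => if pvIsMarker q.2 then some (q.1, pvFileName q.2) else none)).zip
        (((PySem.List.slice ((PySem.List.enumerate lines 0).filterMap
            (fun q => if pvIsMarker q.2 then some (q.1, pvFileName q.2) else none))
            (some 1) none).map (fun m => m.1)) ++ [(lines.length : Int)])).foldl
        (fun files q =>
          if q.1.2 = "" then files
          else files.insert q.1.2
            (PySem.Str.join "\n" (PySem.List.slice lines (some (q.1.1 + 1)) (some q.2))))
        PySem.Dict.empty)
      = pvRef PySem.Dict.empty lines := by
  rw [PySem.List.slice_from_one, pvB_zip]
  rw [show (0 : Int) = ((0 : Nat) : Int) by norm_num, pvB_enum lines 0]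
  exact pvCrux lines.length lines lines le_rfl 0 PySem.Dict.empty (by simp)

lemma pvDictA_eq (lines : List String) :
    pvFinishA (lines.foldl pvStepA (PySem.Dict.empty, none, []))
      = pvRef PySem.Dict.empty lines :=
  (pvA_main lines.length lines le_rfl PySem.Dict.empty).1

lemma pvPorts_eq (result : List (String × String)) :
    extract_files_from_collaborative_result_py result
      = extract_files_from_collaborative_result_py_alt result := by
  unfold extract_files_from_collaborative_result_py extract_files_from_collaborative_result_py_alt
  simp only [pvDictA_eq, pvDictB_eq]

-- ===== VERDICT (by name: the statement is the Claim_ definition above) =====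
theorem extract_files_from_collaborative_result_py_spec : Claim_equal_extract_files_from_collaborative_result_py := by
  intro result _
  unfold Spec_extract_files_from_collaborative_result_py
  exact pvPorts_eq result
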